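-- pv_equiv track=rewrite | github.com/yaof20/ReaL | verl/utils/reward_score/sql_utils.py | remove_input_prompts
-- ===== SOURCE A (Python) =====
-- def remove_input_prompts(stdout: str, prompts: list[str]) -> str:
--     """
--     Remove sequential input prompts from the beginning of the stdout string.
--     Prompts are expected to be at the start of the string without newline separation.
--     Each prompt is removed one at a time from the beginning.
--
--     Args:
--         stdout (str): The output string containing prompts and results
--         prompts (list[str]): List of prompts to remove in sequence
--
--     Returns:
--         str: Cleaned output string with sequential prompts removed from the beginning
--     """
--     assert isinstance(stdout, str), f"stdout must be a string, but got ({type(stdout)}) {stdout}"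
--     result = stdout
--     for prompt in prompts:
--         if not result.startswith(prompt):
--             return stdout  # Return original if prompts don't match sequence
--         result = result[len(prompt):]
--
--     return result.strip()
-- ===== SOURCE B (Python) =====
-- def remove_input_prompts(stdout: str, prompts: list[str]) -> str:
--     assert isinstance(stdout, str), f"stdout must be a string, but got ({type(stdout)}) {stdout}"
--     combined = ''.join(prompts)
--     if stdout.startswith(combined):
--         return stdout[len(combined):].strip()
--     return stdout
-- ===== Notes on version B (the rewrite author's own statement) =====
-- stated objective: simpler
-- what changed: Replaces the sequential per-prompt strip-and-recheck loop (with an early return of the original on first mismatch) by one concatenated-prefix test: join all prompts once, compare with a single startswith, and slice the combined prefix off in one step.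
import Mathlib
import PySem

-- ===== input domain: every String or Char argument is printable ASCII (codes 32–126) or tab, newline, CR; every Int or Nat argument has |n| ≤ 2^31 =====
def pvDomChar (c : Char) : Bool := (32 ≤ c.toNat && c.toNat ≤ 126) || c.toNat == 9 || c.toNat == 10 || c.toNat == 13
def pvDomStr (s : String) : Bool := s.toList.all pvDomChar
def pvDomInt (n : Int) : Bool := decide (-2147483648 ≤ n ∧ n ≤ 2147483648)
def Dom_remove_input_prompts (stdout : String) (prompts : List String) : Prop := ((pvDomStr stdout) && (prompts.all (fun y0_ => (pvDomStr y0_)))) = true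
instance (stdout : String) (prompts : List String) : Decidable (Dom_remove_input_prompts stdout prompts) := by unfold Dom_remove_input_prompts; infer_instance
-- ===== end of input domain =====

-- B replaces A's sequential strip-and-recheck loop by a single join + startswith + slice; objective: simpler.

-- ===== PORT A =====
-- A's for-loop over prompts: state 'result', early return of the original stdout on mismatch.
def removeALoop (orig : List Char) (result : List Char) : List (List Char) → List Char
  | [] => PySem.Chars.strip result
  | p :: rest =>
    if PySem.Chars.startswith result p then
      removeALoop orig (PySem.List.slice result (some ((p.length : Nat) : Int)) none) rest
    else orig

def remove_input_prompts (stdout : String) (prompts : List String) : String :=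
  String.ofList (removeALoop stdout.toList stdout.toList (prompts.map String.toList))

-- ===== PORT B =====
def remove_input_prompts_alt (stdout : String) (prompts : List String) : String :=
  let combined := PySem.Chars.join [] (prompts.map String.toList)
  if PySem.Chars.startswith stdout.toList combined then
    String.ofList (PySem.Chars.strip (PySem.List.slice stdout.toList (some ((combined.length : Nat) : Int)) none))
  else stdout

-- ===== PRECONDITION & SPEC =====
def Spec_remove_input_prompts (stdout : String) (prompts : List String) (out : String) : Prop := out = remove_input_prompts_alt stdout prompts
instance (stdout : String) (prompts : List String) (out : String) : Decidable (Spec_remove_input_prompts stdout prompts out) := by unfold Spec_remove_input_prompts; infer_instance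

-- ===== CLAIM (what is proved, stated in full; the proofs are below) =====
def Claim_equal_remove_input_prompts : Prop := ∀ (stdout : String) (prompts : List String), Dom_remove_input_prompts stdout prompts → Spec_remove_input_prompts stdout prompts (remove_input_prompts stdout prompts)

-- ===== LEMMAS AND PROOFS =====

-- ''.join(parts) is concatenation.
theorem join_nil_sep (ps : List (List Char)) : PySem.Chars.join [] ps = ps.flatten := by
  induction ps with
  | nil => rfl
  | cons p t ih =>
    cases t with
    | nil => simp [PySem.Chars.join, List.intercalate]
    | cons q u => simp_all [PySem.Chars.join_cons_cons]

-- startswith against a concatenation = startswith the first part, then the rest after dropping it.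
theorem startswith_append (p : List Char) : ∀ (cs q : List Char),
    PySem.Chars.startswith cs (p ++ q)
      = (PySem.Chars.startswith cs p && PySem.Chars.startswith (cs.drop p.length) q) := by
  induction p with
  | nil => intro cs q; simp [PySem.Chars.startswith]
  | cons a p ih =>
    intro cs q
    cases cs with
    | nil => simp [PySem.Chars.startswith, List.isPrefixOf]
    | cons c cs =>
      simp [PySem.Chars.startswith, List.isPrefixOf] at ih ⊢
      cases h : a == c <;> simp [ih]

-- A's loop computes exactly B's one-shot test.
theorem removeALoop_eq (orig : List Char) (ps : List (List Char)) : ∀ (cs : List Char),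
    removeALoop orig cs ps
      = if PySem.Chars.startswith cs ps.flatten then PySem.Chars.strip (cs.drop ps.flatten.length) else orig := by
  induction ps with
  | nil => intro cs; simp [removeALoop, PySem.Chars.startswith]
  | cons p rest ih =>
    intro cs
    simp only [removeALoop, PySem.List.slice_from_natCast, List.flatten_cons, startswith_append]
    cases h : PySem.Chars.startswith cs p with
    | false => simp
    | true => simp [ih, List.drop_drop]

-- ===== VERDICT (by name: the statement is the Claim_ definition above) =====
theorem remove_input_prompts_spec : Claim_equal_remove_input_prompts := by
  intro stdout prompts _
  unfold Spec_remove_input_prompts remove_input_prompts remove_input_prompts_alt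
  rw [removeALoop_eq, join_nil_sep]
  simp only [PySem.List.slice_from_natCast]
  split
  · rfl
  · simp [String.ofList_toList]
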